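-- pv_equiv track=rewrite | github.com/ErikTanis/AdventOfCode2023 | day11/code.py | add_space
-- ===== SOURCE A (Python) =====
-- def add_space(galaxy_dict: dict, space: int, space_columns: list, space_rows: list) -> dict:
--     for k, v in galaxy_dict.items():
--         x = v[0]
--         y = v[1]
--         empty_column_amount = len([_ for _ in space_columns if _ < x])
--         empty_row_amount = len([_ for _ in space_rows if _ < y])
--         x += empty_column_amount * space
--         y += empty_row_amount * space
--         galaxy_dict[k] = (x,y)
--     return galaxy_dict
-- ===== SOURCE B (Python) =====
-- def _bisect_left(a, x):
--     # hand-written bisect_left (no imports allowed): index of first element >= x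
--     lo, hi = 0, len(a)
--     while lo < hi:
--         mid = (lo + hi) // 2
--         if a[mid] < x:
--             lo = mid + 1
--         else:
--             hi = mid
--     return lo
--
-- def add_space(galaxy_dict: dict, space: int, space_columns: list, space_rows: list) -> dict:
--     cols = sorted(space_columns)
--     rows = sorted(space_rows)
--     for k, v in galaxy_dict.items():
--         galaxy_dict[k] = (v[0] + _bisect_left(cols, v[0]) * space,
--                           v[1] + _bisect_left(rows, v[1]) * space)
--     return galaxy_dict
-- ===== Notes on version B (the rewrite author's own statement) =====
-- stated objective: faster
-- what changed: Replaces the per-galaxy linear filter scans over space_columns/space_rows by sorting each list once and answering each count-of-smaller query with a binary search.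
import Mathlib
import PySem

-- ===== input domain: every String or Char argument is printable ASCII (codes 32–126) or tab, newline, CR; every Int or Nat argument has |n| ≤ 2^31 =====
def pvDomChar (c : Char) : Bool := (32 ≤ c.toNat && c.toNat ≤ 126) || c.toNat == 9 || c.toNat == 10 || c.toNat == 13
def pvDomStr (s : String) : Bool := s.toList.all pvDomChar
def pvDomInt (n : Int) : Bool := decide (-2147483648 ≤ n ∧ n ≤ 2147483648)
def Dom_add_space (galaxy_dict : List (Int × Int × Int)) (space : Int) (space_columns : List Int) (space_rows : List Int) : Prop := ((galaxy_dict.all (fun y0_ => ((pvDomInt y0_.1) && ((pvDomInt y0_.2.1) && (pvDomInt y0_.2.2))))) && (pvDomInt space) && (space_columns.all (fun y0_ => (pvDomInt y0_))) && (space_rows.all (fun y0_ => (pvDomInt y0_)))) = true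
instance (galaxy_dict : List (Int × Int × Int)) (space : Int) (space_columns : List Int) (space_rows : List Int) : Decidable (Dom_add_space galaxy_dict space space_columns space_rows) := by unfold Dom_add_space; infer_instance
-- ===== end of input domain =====

-- B sorts each space list once and counts preceding empty rows/columns with a binary search
-- instead of A's per-galaxy linear filter scans; return-value equivalence (both mutate the dict in place identically).


-- ===== PORT A =====
-- for k, v in items: count columns < x, rows < y by a linear comprehension, reassign (x,y)
def add_space (galaxy_dict : List (Int × Int × Int)) (space : Int) (space_columns : List Int) (space_rows : List Int) : List (Int × Int × Int) :=
  galaxy_dict.map (fun kv =>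
    let x := kv.2.1
    let y := kv.2.2
    let empty_column_amount : Int := ((space_columns.filter (fun c => decide (c < x))).length : Int)
    let empty_row_amount : Int := ((space_rows.filter (fun r => decide (r < y))).length : Int)
    (kv.1, x + empty_column_amount * space, y + empty_row_amount * space))

-- ===== PORT B =====
-- Source B's hand-written _bisect_left is word-for-word Python's bisect_left loop;
-- PySem.List.bisectLeft is exactly that lo/hi halving loop.
def add_space_alt (galaxy_dict : List (Int × Int × Int)) (space : Int) (space_columns : List Int) (space_rows : List Int) : List (Int × Int × Int) :=
  let cols := PySem.List.sorted space_columns (fun v => v) false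
  let rows := PySem.List.sorted space_rows (fun v => v) false
  galaxy_dict.map (fun kv =>
    (kv.1, kv.2.1 + (PySem.List.bisectLeft cols kv.2.1 : Int) * space,
           kv.2.2 + (PySem.List.bisectLeft rows kv.2.2 : Int) * space))

-- ===== PRECONDITION & SPEC =====
def Spec_add_space (galaxy_dict : List (Int × Int × Int)) (space : Int) (space_columns : List Int) (space_rows : List Int) (out : List (Int × Int × Int)) : Prop := out = add_space_alt galaxy_dict space space_columns space_rows
instance (galaxy_dict : List (Int × Int × Int)) (space : Int) (space_columns : List Int) (space_rows : List Int) (out : List (Int × Int × Int)) : Decidable (Spec_add_space galaxy_dict space space_columns space_rows out) := by unfold Spec_add_space; infer_instance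

-- ===== CLAIM (what is proved, stated in full; the proofs are below) =====
def Claim_equal_add_space : Prop := ∀ (galaxy_dict : List (Int × Int × Int)) (space : Int) (space_columns : List Int) (space_rows : List Int), Dom_add_space galaxy_dict space space_columns space_rows → Spec_add_space galaxy_dict space space_columns space_rows (add_space galaxy_dict space space_columns space_rows)

-- ===== LEMMAS AND PROOFS =====

-- a list is fully characterised by a cut point: all entries before k satisfy p, from k on fail p
theorem countP_eq_cut {p : Int → Bool} : ∀ (s : List Int) (k : Nat), k ≤ s.length →
    (∀ j (hj : j < s.length), j < k → p s[j]) →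
    (∀ j (hj : j < s.length), k ≤ j → ¬ p s[j]) →
    s.countP p = k := by
  intro s
  induction s with
  | nil => intro k hk _ _; simp at hk; simp [hk]
  | cons a t ih =>
    intro k hk h1 h2
    cases k with
    | zero =>
      have : ∀ b ∈ (a :: t), ¬ p b := by
        intro b hb
        obtain ⟨i, hi, rfl⟩ := List.mem_iff_getElem.mp hb
        exact h2 i hi (Nat.zero_le _)
      simpa using List.countP_eq_zero.mpr this
    | succ k' =>
      have hpa : p a := h1 0 (by simp) (Nat.succ_pos _)
      have ht : t.countP p = k' := by
        apply ih k' (by simpa using hk)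
        · intro j hj hjk
          have := h1 (j+1) (by simpa using Nat.succ_lt_succ hj) (Nat.succ_lt_succ hjk)
          simpa using this
        · intro j hj hjk
          have := h2 (j+1) (by simpa using Nat.succ_lt_succ hj) (Nat.succ_le_succ hjk)
          simpa using this
      simp [hpa, ht]

-- binary search on the sorted copy counts exactly the elements below x
theorem bisect_sorted_eq_countP (l : List Int) (x : Int) :
    PySem.List.bisectLeft (PySem.List.sorted l (fun v => v) false) x
      = l.countP (fun c => decide (c < x)) := by
  set s := PySem.List.sorted l (fun v => v) false with hs
  have hpw : s.Pairwise (fun a b => a ≤ b) := by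
    simpa using PySem.List.sorted_pairwise (xs := l) (key := fun v => v)
  obtain ⟨hk, h1, h2⟩ := PySem.List.bisectLeft_spec s x hpw
  have hcut : s.countP (fun c => decide (c < x)) = PySem.List.bisectLeft s x := by
    apply countP_eq_cut s _ hk
    · intro j hj hjk; simpa using h1 j hj hjk
    · intro j hj hjk; simpa using not_lt.mpr (h2 j hj hjk)
  have hperm : s.Perm l := PySem.List.sorted_perm l (fun v => v) false
  rw [← hcut, hperm.countP_eq]

theorem count_filter_eq_bisect (l : List Int) (x : Int) :
    ((l.filter (fun c => decide (c < x))).length : Int)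
      = (PySem.List.bisectLeft (PySem.List.sorted l (fun v => v) false) x : Int) := by
  rw [bisect_sorted_eq_countP, List.countP_eq_length_filter]

-- ===== VERDICT (by name: the statement is the Claim_ definition above) =====
theorem add_space_spec : Claim_equal_add_space := by
  intro gd space sc sr _
  unfold Spec_add_space add_space add_space_alt
  apply List.map_congr_left
  intro kv _
  simp only []
  rw [count_filter_eq_bisect sc kv.2.1, count_filter_eq_bisect sr kv.2.2]
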